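-- pv_equiv track=rewrite | github.com/federiconbaez/meli-challenge | meli_challenge_python/src/main.py | extract_diagonals
-- ===== SOURCE A (Python) =====
-- from typing import List
--
-- def extract_diagonals(dna: List[str]) -> List[str]:
--     """
--     Extracts all diagonals (both from top-left to bottom-right and top-right to bottom-left) from the DNA matrix.
--
--     :param dna: List of strings representing each row of an NxN DNA sequence table.
--     :return: List of strings representing all diagonals.
--     """
--     n = len(dna)
--     diagonals = []
--
--     # Top-left to bottom-right diagonals
--     for k in range(-(n-1), n):
--         diagonal = []
--         for i in range(n):
--             j = i - k
--             if 0 <= j < n: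
--                 diagonal.append(dna[i][j])
--         if len(diagonal) >= 4:
--             diagonals.append(''.join(diagonal))
--
--     # Top-right to bottom-left diagonals
--     for k in range(-(n-1), n):
--         diagonal = []
--         for i in range(n):
--             j = n - 1 - i - k
--             if 0 <= j < n:
--                 diagonal.append(dna[i][j])
--         if len(diagonal) >= 4:
--             diagonals.append(''.join(diagonal))
--
--     return diagonals
-- ===== SOURCE B (Python) =====
-- from typing import List
--
-- def extract_diagonals(dna: List[str]) -> List[str]:
--     """Group cells by diagonal key in one pass over the grid, then emit buckets in key order."""
--     n = len(dna)
--     cells = [(i, j, dna[i][j]) for i in range(n) for j in range(n)]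
--     main = {}
--     for (i, j, c) in cells:
--         main.setdefault(i - j, []).append(c)
--     anti = {}
--     for (i, j, c) in cells:
--         anti.setdefault(i + j, []).append(c)
--     out = []
--     for k in sorted(main):
--         if len(main[k]) >= 4:
--             out.append(''.join(main[k]))
--     for s in sorted(anti, reverse=True):
--         if len(anti[s]) >= 4:
--             out.append(''.join(anti[s]))
--     return out
-- ===== Notes on version B (the rewrite author's own statement) =====
-- stated objective: alternative
-- what changed: Instead of 2*(2n-1) bounds-checked offset scans over all rows (one per diagonal), B makes one pass over the grid cells grouping each character into main (i-j) and anti (i+j) diagonal buckets in two dictionaries, then emits the buckets with keys sorted ascending (main) and descending (anti), keeping those of length >= 4.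
import Mathlib
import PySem

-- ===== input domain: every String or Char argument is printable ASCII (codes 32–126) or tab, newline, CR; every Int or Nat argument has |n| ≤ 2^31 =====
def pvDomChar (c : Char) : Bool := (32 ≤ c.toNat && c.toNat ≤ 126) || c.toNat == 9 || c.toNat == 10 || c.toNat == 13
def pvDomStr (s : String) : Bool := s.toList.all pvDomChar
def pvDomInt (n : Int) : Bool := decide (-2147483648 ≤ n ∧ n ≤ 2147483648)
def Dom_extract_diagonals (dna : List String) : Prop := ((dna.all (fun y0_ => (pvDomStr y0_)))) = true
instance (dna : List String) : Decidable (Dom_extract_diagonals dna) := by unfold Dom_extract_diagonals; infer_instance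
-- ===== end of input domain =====

-- B groups the grid's cells into diagonal buckets (dicts keyed by i-j and i+j) in one pass, instead of one bounds-checked row scan per diagonal; alternative decomposition, same asymptotic cost.

-- shared cell accessor dna[i][j]; the .getD defaults are unreachable under Pre_
def pvCell (dna : List String) (i j : Int) : Char :=
  (PySem.Str.pyGet? ((PySem.List.pyGet? dna i).getD "") j).getD ' '

-- ===== PORT A =====
def extract_diagonals (dna : List String) : List String :=
  let n : Int := dna.length
  let d1 := (PySem.List.pyRange (-(n-1)) n).foldl (fun acc k =>
      let diagonal := (PySem.List.pyRange 0 n).foldl (fun diag i =>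
          let j := i - k
          if 0 ≤ j ∧ j < n then diag ++ [pvCell dna i j] else diag) []
      if 4 ≤ diagonal.length then acc ++ [String.mk diagonal] else acc) []
  (PySem.List.pyRange (-(n-1)) n).foldl (fun acc k =>
      let diagonal := (PySem.List.pyRange 0 n).foldl (fun diag i =>
          let j := n - 1 - i - k
          if 0 ≤ j ∧ j < n then diag ++ [pvCell dna i j] else diag) []
      if 4 ≤ diagonal.length then acc ++ [String.mk diagonal] else acc) d1

-- ===== PORT B =====
def extract_diagonals_alt (dna : List String) : List String :=
  let n : Int := dna.length
  let cells : List (Int × Int × Char) :=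
    (PySem.List.pyRange 0 n).flatMap (fun i =>
      (PySem.List.pyRange 0 n).map (fun j => (i, j, pvCell dna i j)))
  let main := cells.foldl (fun d t => d.modify (t.1 - t.2.1) [] (fun v => v ++ [t.2.2]))
      (⟨[]⟩ : PySem.Dict Int (List Char))
  let anti := cells.foldl (fun d t => d.modify (t.1 + t.2.1) [] (fun v => v ++ [t.2.2]))
      (⟨[]⟩ : PySem.Dict Int (List Char))
  let out1 := (PySem.List.sorted main.keys (fun x => x)).foldl (fun acc k =>
      if 4 ≤ (main.getD k []).length then acc ++ [String.mk (main.getD k [])] else acc) []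
  (PySem.List.sorted anti.keys (fun x => x) true).foldl (fun acc s =>
      if 4 ≤ (anti.getD s []).length then acc ++ [String.mk (anti.getD s [])] else acc) out1

-- ===== PRECONDITION & SPEC =====
-- Pre_ excludes exactly the ragged inputs on which the Python A raises IndexError: a row shorter than the number of rows.
def Pre_extract_diagonals (dna : List String) : Prop := ∀ s ∈ dna, dna.length ≤ s.toList.length
instance (dna : List String) : Decidable (Pre_extract_diagonals dna) := by unfold Pre_extract_diagonals; infer_instance
def pvWitness_extract_diagonals : List String := ["ACGT", "TGCA", "GATC", "CTAG"]

def Spec_extract_diagonals (dna : List String) (out : List String) : Prop := out = extract_diagonals_alt dna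
instance (dna : List String) (out : List String) : Decidable (Spec_extract_diagonals dna out) := by unfold Spec_extract_diagonals; infer_instance

-- ===== CLAIM (what is proved, stated in full; the proofs are below) =====
def Claim_equal_extract_diagonals : Prop := ∀ (dna : List String), Dom_extract_diagonals dna → Pre_extract_diagonals dna → Spec_extract_diagonals dna (extract_diagonals dna)

-- ===== LEMMAS AND PROOFS =====

-- proof-side abbreviations (mirror the zeta-reduced port bodies)
def pvCells (dna : List String) : List (Int × Int × Char) :=
  (PySem.List.pyRange 0 (dna.length : Int)).flatMap (fun i =>
    (PySem.List.pyRange 0 (dna.length : Int)).map (fun j => (i, j, pvCell dna i j)))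

def pvMainD (dna : List String) : PySem.Dict Int (List Char) :=
  (pvCells dna).foldl (fun d t => d.modify (t.1 - t.2.1) [] (fun v => v ++ [t.2.2]))
    (⟨[]⟩ : PySem.Dict Int (List Char))

def pvAntiD (dna : List String) : PySem.Dict Int (List Char) :=
  (pvCells dna).foldl (fun d t => d.modify (t.1 + t.2.1) [] (fun v => v ++ [t.2.2]))
    (⟨[]⟩ : PySem.Dict Int (List Char))

-- the main (i-j = k) diagonal, read row by row
def pvDiagM (dna : List String) (k : Int) : List Char :=
  ((PySem.List.pyRange 0 (dna.length : Int)).filter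
      (fun i => decide (0 ≤ i - k ∧ i - k < (dna.length : Int)))).map
    (fun i => pvCell dna i (i - k))

-- the anti (i+j = s) diagonal, read row by row
def pvBucketA (dna : List String) (s : Int) : List Char :=
  ((PySem.List.pyRange 0 (dna.length : Int)).filter
      (fun i => decide (0 ≤ s - i ∧ s - i < (dna.length : Int)))).map
    (fun i => pvCell dna i (s - i))

-- common normal form of both ports
def pvOut (dna : List String) : List String :=
  ((PySem.List.pyRange (-((dna.length : Int) - 1)) (dna.length : Int)).filter
      (fun k => decide (4 ≤ (pvDiagM dna k).length))).map (fun k => String.mk (pvDiagM dna k))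
  ++ ((PySem.List.pyRange (-((dna.length : Int) - 1)) (dna.length : Int)).filter
      (fun k => decide (4 ≤ (pvBucketA dna ((dna.length : Int) - 1 - k)).length))).map
      (fun k => String.mk (pvBucketA dna ((dna.length : Int) - 1 - k)))

-- Prop-valued variant of PySem.List.foldl_append_if
theorem pv_foldl_append_if {α β : Type} (p : α → Prop) [DecidablePred p] (f : α → β)
    (l : List α) (acc : List β) :
    l.foldl (fun acc x => if p x then acc ++ [f x] else acc) acc
      = acc ++ (l.filter (fun x => decide (p x))).map f := by
  have := PySem.List.foldl_append_if (fun x => decide (p x)) f l acc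
  simpa using this

theorem pv_flatMap_if_singleton {α β : Type} (p : α → Prop) [DecidablePred p] (f : α → β)
    (l : List α) :
    l.flatMap (fun a => if p a then [f a] else [])
      = (l.filter (fun x => decide (p x))).map f := by
  induction l with
  | nil => rfl
  | cons a l ih => by_cases h : p a <;> simp [h, ih]

-- filter of List.range for "(j : Int) equals c"
theorem pv_filter_range_int (N : Nat) (c : Int) :
    (List.range N).filter (fun j : Nat => decide ((j : Int) = c))
      = if 0 ≤ c ∧ c < (N : Int) then [c.toNat] else [] := by
  induction N with
  | zero =>
      have h : ¬ (0 ≤ c ∧ c < ((0 : Nat) : Int)) := by omega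
      simp [h]
  | succ N ih =>
      rw [List.range_succ, List.filter_append, ih]
      by_cases h : (N : Int) = c
      · have h0 : 0 ≤ c ∧ c < ((N + 1 : Nat) : Int) := by omega
        have h1 : ¬ (0 ≤ c ∧ c < (N : Int)) := by omega
        have hc : c.toNat = N := by omega
        simp [h, h1, h0, hc]
      · by_cases h2 : 0 ≤ c ∧ c < (N : Int)
        · have h3 : 0 ≤ c ∧ c < ((N + 1 : Nat) : Int) := by omega
          simp [h, h2, h3]
          omega
        · have h3 : ¬ (0 ≤ c ∧ c < ((N + 1 : Nat) : Int)) := by omega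
          simp [h, h2, h3]
          omega

theorem pv_pyRange_nil {a b : Int} (h : b ≤ a) : PySem.List.pyRange a b = [] := by
  apply List.eq_nil_iff_forall_not_mem.mpr
  intro x hx
  rw [PySem.List.mem_pyRange_one] at hx
  omega

theorem pv_pyRange_eq_map (a : Int) (m : Nat) :
    PySem.List.pyRange a (a + (m : Int)) = (List.range m).map (fun t : Nat => a + (t : Int)) := by
  induction m with
  | zero =>
      rw [show a + ((0 : Nat) : Int) = a by simp, pv_pyRange_nil le_rfl]
      simp
  | succ m ih =>
      rw [show ((m + 1 : Nat) : Int) = (m : Int) + 1 by push_cast; ring,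
          show a + ((m : Int) + 1) = (a + (m : Int)) + 1 by ring,
          PySem.List.pyRange_one_succ_right (by omega), ih, List.range_succ, List.map_append]
      simp

theorem pv_pyRange_pairwise (a b : Int) : (PySem.List.pyRange a b).Pairwise (· < ·) := by
  by_cases h : a ≤ b
  · rw [show b = a + (((b - a).toNat : Nat) : Int) by omega, pv_pyRange_eq_map, List.pairwise_map]
    refine List.Pairwise.imp ?_ List.pairwise_lt_range
    intro x y hxy
    omega
  · rw [pv_pyRange_nil (by omega)]
    exact List.Pairwise.nil

theorem pv_pyRange_nodup (a b : Int) : (PySem.List.pyRange a b).Nodup :=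
  (pv_pyRange_pairwise a b).imp (fun hlt => ne_of_lt hlt)

-- the j-scan of row i restricted to the main diagonal k yields at most one cell
theorem pv_inner_main (dna : List String) (i k : Int) :
    (((PySem.List.pyRange 0 (dna.length : Int)).filter (fun j => i - j == k)).map
        (fun j => pvCell dna i j))
      = if 0 ≤ i - k ∧ i - k < (dna.length : Int) then [pvCell dna i (i - k)] else [] := by
  rw [PySem.List.pyRange_zero_natCast, List.filter_map, List.map_map]
  rw [List.filter_congr (q := fun j : Nat => decide ((j : Int) = i - k))
      (fun j _ => by by_cases hj : (j : Int) = i - k <;> simp [hj] <;> omega)]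
  rw [pv_filter_range_int]
  split_ifs with h
  · simp [Int.toNat_of_nonneg h.1]
  · simp

-- the j-scan of row i restricted to the anti diagonal s yields at most one cell
theorem pv_inner_anti (dna : List String) (i s : Int) :
    (((PySem.List.pyRange 0 (dna.length : Int)).filter (fun j => i + j == s)).map
        (fun j => pvCell dna i j))
      = if 0 ≤ s - i ∧ s - i < (dna.length : Int) then [pvCell dna i (s - i)] else [] := by
  rw [PySem.List.pyRange_zero_natCast, List.filter_map, List.map_map]
  rw [List.filter_congr (q := fun j : Nat => decide ((j : Int) = s - i))
      (fun j _ => by by_cases hj : (j : Int) = s - i <;> simp [hj] <;> omega)]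
  rw [pv_filter_range_int]
  split_ifs with h
  · simp [Int.toNat_of_nonneg h.1]
  · simp

-- the main dict's bucket for key k is the main diagonal k
theorem pv_main_getD (dna : List String) (k : Int) :
    (pvMainD dna).getD k [] = pvDiagM dna k := by
  have h := PySem.Dict.getD_foldl_modify_append
      ((pvCells dna).map (fun t => (t.1 - t.2.1, t.2.2)))
      (⟨[]⟩ : PySem.Dict Int (List Char)) k
  simp only [List.foldl_map] at h
  rw [pvMainD, h, show ((⟨[]⟩ : PySem.Dict Int (List Char)).getD k []) = ([] : List Char) from rfl,
      List.nil_append]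
  simp only [pvCells, List.map_flatMap, List.filter_flatMap, List.map_map, List.filter_map,
    Function.comp_def]
  simp only [pv_inner_main dna _ k]
  simp only [pv_flatMap_if_singleton (fun i => 0 ≤ i - k ∧ i - k < (dna.length : Int))
      (fun i => pvCell dna i (i - k))]
  rw [pvDiagM]

-- the anti dict's bucket for key s is the anti diagonal s
theorem pv_anti_getD (dna : List String) (s : Int) :
    (pvAntiD dna).getD s [] = pvBucketA dna s := by
  have h := PySem.Dict.getD_foldl_modify_append
      ((pvCells dna).map (fun t => (t.1 + t.2.1, t.2.2)))
      (⟨[]⟩ : PySem.Dict Int (List Char)) s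
  simp only [List.foldl_map] at h
  rw [pvAntiD, h, show ((⟨[]⟩ : PySem.Dict Int (List Char)).getD s []) = ([] : List Char) from rfl,
      List.nil_append]
  simp only [pvCells, List.map_flatMap, List.filter_flatMap, List.map_map, List.filter_map,
    Function.comp_def]
  simp only [pv_inner_anti dna _ s]
  simp only [pv_flatMap_if_singleton (fun i => 0 ≤ s - i ∧ s - i < (dna.length : Int))
      (fun i => pvCell dna i (s - i))]
  rw [pvBucketA]

-- membership in the main-key image of the cell list
theorem pv_mem_cells_main (dna : List String) (x : Int) :
    x ∈ (pvCells dna).map (fun t => t.1 - t.2.1)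
      ↔ (-((dna.length : Int) - 1) ≤ x ∧ x < (dna.length : Int)) := by
  simp only [pvCells, List.mem_map, List.mem_flatMap, PySem.List.mem_pyRange_one]
  constructor
  · rintro ⟨t, ⟨i, hi, j, hj, rfl⟩, rfl⟩
    dsimp only
    omega
  · rintro ⟨h1, h2⟩
    refine ⟨(max x 0, max x 0 - x, pvCell dna (max x 0) (max x 0 - x)),
      ⟨max x 0, by omega, ⟨max x 0 - x, by omega, rfl⟩⟩, by dsimp only; omega⟩

-- membership in the anti-key image of the cell list
theorem pv_mem_cells_anti (dna : List String) (x : Int) :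
    x ∈ (pvCells dna).map (fun t => t.1 + t.2.1)
      ↔ (0 ≤ x ∧ x ≤ 2 * (dna.length : Int) - 2) := by
  simp only [pvCells, List.mem_map, List.mem_flatMap, PySem.List.mem_pyRange_one]
  constructor
  · rintro ⟨t, ⟨i, hi, j, hj, rfl⟩, rfl⟩
    dsimp only
    omega
  · rintro ⟨h1, h2⟩
    refine ⟨(min x ((dna.length : Int) - 1), x - min x ((dna.length : Int) - 1),
      pvCell dna (min x ((dna.length : Int) - 1)) (x - min x ((dna.length : Int) - 1))),
      ⟨min x ((dna.length : Int) - 1), by omega,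
        ⟨x - min x ((dna.length : Int) - 1), by omega, rfl⟩⟩, by dsimp only; omega⟩

theorem pv_main_sorted (dna : List String) :
    PySem.List.sorted (pvMainD dna).keys (fun x => x)
      = PySem.List.pyRange (-((dna.length : Int) - 1)) (dna.length : Int) := by
  rw [pvMainD]
  rw [PySem.Dict.keys_foldl_modify_key (pvCells dna) (fun t => t.1 - t.2.1) []
      (fun _ t => fun v => v ++ [t.2.2]) ⟨[]⟩]
  rw [show (PySem.Set.update ((⟨[]⟩ : PySem.Dict Int (List Char)).keys)
      ((pvCells dna).map (fun t => t.1 - t.2.1)))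
      = PySem.Set.ofList ((pvCells dna).map (fun t => t.1 - t.2.1)) from rfl]
  apply PySem.List.sorted_eq_of_perm_of_pairwise_lt
  · rw [List.perm_ext_iff_of_nodup (pv_pyRange_nodup _ _) (PySem.Set.nodup_ofList _)]
    intro x
    rw [PySem.List.mem_pyRange_one, PySem.Set.mem_ofList, pv_mem_cells_main dna x]
  · exact pv_pyRange_pairwise _ _

theorem pv_anti_sorted (dna : List String) :
    PySem.List.sorted (pvAntiD dna).keys (fun x => x) true
      = (PySem.List.pyRange (-((dna.length : Int) - 1)) (dna.length : Int)).map
          (fun k => (dna.length : Int) - 1 - k) := by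
  rw [pvAntiD]
  rw [PySem.Dict.keys_foldl_modify_key (pvCells dna) (fun t => t.1 + t.2.1) []
      (fun _ t => fun v => v ++ [t.2.2]) ⟨[]⟩]
  rw [show (PySem.Set.update ((⟨[]⟩ : PySem.Dict Int (List Char)).keys)
      ((pvCells dna).map (fun t => t.1 + t.2.1)))
      = PySem.Set.ofList ((pvCells dna).map (fun t => t.1 + t.2.1)) from rfl]
  apply PySem.List.sorted_rev_eq_of_perm_of_pairwise_gt
  · rw [List.perm_ext_iff_of_nodup
      ((pv_pyRange_nodup _ _).map (fun a b hab => by omega)) (PySem.Set.nodup_ofList _)]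
    intro x
    rw [PySem.Set.mem_ofList, pv_mem_cells_anti dna x]
    simp only [List.mem_map, PySem.List.mem_pyRange_one]
    constructor
    · rintro ⟨k, hk, hx⟩
      omega
    · rintro ⟨h1, h2⟩
      exact ⟨(dna.length : Int) - 1 - x, by omega, by omega⟩
  · rw [List.pairwise_map]
    refine List.Pairwise.imp ?_ (pv_pyRange_pairwise _ _)
    intro a b hab
    omega

theorem pv_A_char (dna : List String) : extract_diagonals dna = pvOut dna := by
  simp only [extract_diagonals]
  have h1 : ∀ k : Int,
      (PySem.List.pyRange 0 (dna.length : Int)).foldl (fun diag i =>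
          if 0 ≤ i - k ∧ i - k < (dna.length : Int) then diag ++ [pvCell dna i (i - k)] else diag)
        ([] : List Char) = pvDiagM dna k := by
    intro k
    rw [pv_foldl_append_if (fun i => 0 ≤ i - k ∧ i - k < (dna.length : Int))
        (fun i => pvCell dna i (i - k))]
    simp [pvDiagM]
  have h2 : ∀ k : Int,
      (PySem.List.pyRange 0 (dna.length : Int)).foldl (fun diag i =>
          if 0 ≤ (dna.length : Int) - 1 - i - k ∧ (dna.length : Int) - 1 - i - k < (dna.length : Int)
          then diag ++ [pvCell dna i ((dna.length : Int) - 1 - i - k)] else diag)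
        ([] : List Char) = pvBucketA dna ((dna.length : Int) - 1 - k) := by
    intro k
    rw [pv_foldl_append_if
        (fun i => 0 ≤ (dna.length : Int) - 1 - i - k ∧ (dna.length : Int) - 1 - i - k < (dna.length : Int))
        (fun i => pvCell dna i ((dna.length : Int) - 1 - i - k))]
    have e : ∀ i : Int, (dna.length : Int) - 1 - k - i = (dna.length : Int) - 1 - i - k := by
      intro i; ring
    simp only [pvBucketA, List.nil_append, e]
  simp only [h1, h2]
  rw [pv_foldl_append_if (fun k => 4 ≤ (pvDiagM dna k).length)
      (fun k => String.mk (pvDiagM dna k))]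
  rw [pv_foldl_append_if (fun k => 4 ≤ (pvBucketA dna ((dna.length : Int) - 1 - k)).length)
      (fun k => String.mk (pvBucketA dna ((dna.length : Int) - 1 - k)))]
  simp [pvOut]

theorem pv_B_char (dna : List String) : extract_diagonals_alt dna = pvOut dna := by
  simp only [extract_diagonals_alt]
  rw [show ((PySem.List.pyRange 0 (dna.length : Int)).flatMap (fun i =>
      (PySem.List.pyRange 0 (dna.length : Int)).map (fun j => (i, j, pvCell dna i j))))
      = pvCells dna from rfl]
  rw [show ((pvCells dna).foldl (fun d t => d.modify (t.1 - t.2.1) [] (fun v => v ++ [t.2.2]))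
      (⟨[]⟩ : PySem.Dict Int (List Char))) = pvMainD dna from rfl]
  rw [show ((pvCells dna).foldl (fun d t => d.modify (t.1 + t.2.1) [] (fun v => v ++ [t.2.2]))
      (⟨[]⟩ : PySem.Dict Int (List Char))) = pvAntiD dna from rfl]
  simp only [pv_main_getD, pv_anti_getD]
  rw [pv_main_sorted, pv_anti_sorted]
  rw [pv_foldl_append_if (fun k => 4 ≤ (pvDiagM dna k).length)
      (fun k => String.mk (pvDiagM dna k))]
  rw [List.foldl_map]
  rw [pv_foldl_append_if (fun k => 4 ≤ (pvBucketA dna ((dna.length : Int) - 1 - k)).length)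
      (fun k => String.mk (pvBucketA dna ((dna.length : Int) - 1 - k)))]
  simp [pvOut]

-- ===== VERDICT (by name: the statement is the Claim_ definition above) =====
theorem extract_diagonals_spec : Claim_equal_extract_diagonals := by
  intro dna _ _
  unfold Spec_extract_diagonals
  rw [pv_A_char, pv_B_char]
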